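-- pv_equiv track=rewrite | github.com/Macost22/Humath-Curie-ECG | ecg_feature_extraction/normalized_fiducial_points.py | flatten_fiducial
-- ===== SOURCE A (Python) =====
-- from collections import defaultdict
--
-- def flatten_fiducial(fiducial_list):
--     flatten_fiducial_list = defaultdict(list)
--
--     for person in fiducial_list:
--         # you can list as many input dicts as you want here
--         for key, value in person.items():
--             flatten_fiducial_list[key].append(value)
--
--     for key, value in flatten_fiducial_list.items():
--         flatten_fiducial_list[key] = [item for sublist in value for item in sublist]
--
--     return flatten_fiducial_list
-- ===== SOURCE B (Python) =====
-- def flatten_fiducial(fiducial_list):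
--     keys = []
--     for person in fiducial_list:
--         for key in person:
--             if key not in keys:
--                 keys.append(key)
--     return {key: [item for person in fiducial_list if key in person for item in person[key]]
--             for key in keys}
-- ===== Notes on version B (the rewrite author's own statement) =====
-- stated objective: alternative
-- what changed: B first collects the distinct keys in first-appearance order, then builds each key's flattened list with one per-key comprehension scanning the persons, instead of A's incremental defaultdict grouping of whole lists followed by a separate flatten pass over the dict.
import Mathlib
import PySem

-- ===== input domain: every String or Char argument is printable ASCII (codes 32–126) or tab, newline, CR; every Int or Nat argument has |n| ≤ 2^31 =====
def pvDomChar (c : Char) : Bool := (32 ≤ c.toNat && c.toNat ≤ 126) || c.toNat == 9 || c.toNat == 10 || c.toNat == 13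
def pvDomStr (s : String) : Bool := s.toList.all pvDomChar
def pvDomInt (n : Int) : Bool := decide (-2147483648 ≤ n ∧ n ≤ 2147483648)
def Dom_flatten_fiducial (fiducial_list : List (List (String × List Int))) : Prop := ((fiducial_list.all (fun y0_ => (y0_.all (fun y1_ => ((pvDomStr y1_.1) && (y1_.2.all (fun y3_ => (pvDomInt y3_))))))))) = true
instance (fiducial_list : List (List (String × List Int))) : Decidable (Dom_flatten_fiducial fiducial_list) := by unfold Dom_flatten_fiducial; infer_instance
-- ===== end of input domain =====

-- B collects the distinct keys first and then gathers each key's values by a per-key scan,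
-- instead of A's incremental grouping dict plus flatten pass; equivalence of the return value.

-- ===== PORT A =====
-- Each person dict arrives as an association list; PySem.Dict.ofList rebuilds the Python dict
-- (insertion order, later duplicate keys overwrite) before iterating person.items().
-- Python's second loop reassigns flatten_fiducial_list[key] in place with the flattened list,
-- changing the dict's value type (list-of-lists to list); Lean needs one type, so that loop is
-- ported as the same in-order foldl over d.items rebuilding the dict with the flattened value
-- per key (exact: keys are unique and the loop keeps every key's position).
def flatten_fiducial (fiducial_list : List (List (String × List Int))) : List (String × List Int) :=
  let d : PySem.Dict String (List (List Int)) :=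
    fiducial_list.foldl
      (fun d person =>
        (PySem.Dict.ofList person).items.foldl
          (fun d kv => d.modify kv.1 [] (fun v => v ++ [kv.2])) d)
      PySem.Dict.empty
  (d.items.foldl (fun e kv => e.insert kv.1 kv.2.flatten)
      (PySem.Dict.empty : PySem.Dict String (List Int))).items

-- ===== PORT B =====
-- First loop: the distinct keys in first-appearance order ('if key not in keys: keys.append').
-- Then the dict comprehension: for each such key, one comprehension over the persons collecting
-- person[key]'s items whenever the person has the key; the keys list is duplicate-free, so the
-- comprehension dict is built by inserting each (key, value) in order.
def flatten_fiducial_alt (fiducial_list : List (List (String × List Int))) : List (String × List Int) :=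
  let keys : List String :=
    fiducial_list.foldl
      (fun ks person =>
        (PySem.Dict.ofList person).keys.foldl
          (fun ks k => if ks.contains k then ks else ks ++ [k]) ks) []
  (keys.foldl
      (fun e key =>
        e.insert key
          (fiducial_list.flatMap (fun person =>
            if (PySem.Dict.ofList person).contains key
            then ((PySem.Dict.ofList person).get? key).getD [] else [])))
      (PySem.Dict.empty : PySem.Dict String (List Int))).items

-- ===== PRECONDITION & SPEC =====
def Spec_flatten_fiducial (fiducial_list : List (List (String × List Int))) (out : List (String × List Int)) : Prop := out = flatten_fiducial_alt fiducial_list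
instance (fiducial_list : List (List (String × List Int))) (out : List (String × List Int)) : Decidable (Spec_flatten_fiducial fiducial_list out) := by unfold Spec_flatten_fiducial; infer_instance

-- ===== CLAIM (what is proved, stated in full; the proofs are below) =====
def Claim_equal_flatten_fiducial : Prop := ∀ (fiducial_list : List (List (String × List Int))), Dom_flatten_fiducial fiducial_list → Spec_flatten_fiducial fiducial_list (flatten_fiducial fiducial_list)

-- ===== LEMMAS AND PROOFS =====

-- The one flat stream of (key, value-list) pairs both programs group: all persons' items in order.
def pvStream (fiducial_list : List (List (String × List Int))) : List (String × List Int) :=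
  fiducial_list.flatMap (fun person => (PySem.Dict.ofList person).items)

lemma pvFlattenFlatMap {α β : Type} (l : List α) (g : α → List (List β)) :
    (l.flatMap g).flatten = l.flatMap (fun x => (g x).flatten) := by
  induction l with
  | nil => simp
  | cons a t ih => simp [ih]

-- B's key loop body IS Set.add, so the whole collection is Set.update from the empty set.
lemma pvKeysAux (l : List (List (String × List Int))) :
    ∀ s : List String,
      l.foldl (fun ks person =>
          (PySem.Dict.ofList person).keys.foldl
            (fun ks k => if ks.contains k then ks else ks ++ [k]) ks) s
        = PySem.Set.update s (l.flatMap (fun p => (PySem.Dict.ofList p).keys)) := by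
  induction l with
  | nil => intro s; simp [PySem.Set.update]
  | cons p rest ih =>
      intro s
      have hinner : ∀ (s : List String) (keys : List String),
          keys.foldl (fun ks k => if ks.contains k then ks else ks ++ [k]) s
            = PySem.Set.update s keys := fun _ _ => rfl
      rw [List.foldl_cons, ih, List.flatMap_cons, PySem.Set.update_append, hinner]

-- B's collected keys = the distinct keys of the stream, in first-appearance order.
lemma pvKeysB (fiducial_list : List (List (String × List Int))) :
    (fiducial_list.foldl
      (fun ks person =>
        (PySem.Dict.ofList person).keys.foldl
          (fun ks k => if ks.contains k then ks else ks ++ [k]) ks) [])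
    = PySem.Set.ofList ((pvStream fiducial_list).map (·.1)) := by
  rw [pvKeysAux, ← PySem.Set.update_nil_left]
  congr 1
  simp [pvStream, List.map_flatMap, PySem.Dict.keys]

-- on a duplicate-free association list, filter-for-one-key then flatten = the single lookup
lemma pvLookupList (k : String) (l : List (String × List Int)) (h : (l.map (·.1)).Nodup) :
    ((l.filter (fun q => q.1 == k)).map (·.2)).flatten
      = (if (PySem.Dict.mk l).contains k
          then ((PySem.Dict.mk l).get? k).getD [] else []) := by
  induction l with
  | nil => simp [PySem.Dict.contains]
  | cons ab rest ih =>
      obtain ⟨a, b⟩ := ab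
      simp only [List.map_cons, List.nodup_cons] at h
      by_cases hak : (a == k) = true
      · have hk : a = k := by simpa using hak
        have hfil : rest.filter (fun q => q.1 == k) = [] := by
          rw [List.filter_eq_nil_iff]
          intro q hq hqk
          exact h.1 (hk ▸ (by simpa using hqk) ▸ List.mem_map_of_mem hq)
        simp [hak, hfil, PySem.Dict.contains, PySem.Dict.get?_mk_cons]
      · have hf : (a == k) = false := by simpa using hak
        simp [hf, ih h.2, PySem.Dict.contains, PySem.Dict.get?_mk_cons]
        congr 1
        simp [hf]

-- per person: filtering its items for one key and flattening = the single lookup B does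
lemma pvPerPerson (k : String) (person : List (String × List Int)) :
    (((PySem.Dict.ofList person).items.filter (fun q => q.1 == k)).map (·.2)).flatten
      = (if (PySem.Dict.ofList person).contains k
          then ((PySem.Dict.ofList person).get? k).getD [] else []) := by
  have h := PySem.Dict.nodup_keys_ofList (ps := person)
  exact pvLookupList k (PySem.Dict.ofList person).items h

-- ===== VERDICT (by name: the statement is the Claim_ definition above) =====
theorem flatten_fiducial_spec : Claim_equal_flatten_fiducial := by
  intro fl _
  unfold Spec_flatten_fiducial flatten_fiducial flatten_fiducial_alt
  -- A's grouping loop = one fold over the flat stream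
  have hA : fl.foldl
      (fun d person =>
        (PySem.Dict.ofList person).items.foldl
          (fun d kv => d.modify kv.1 [] (fun v => v ++ [kv.2])) d)
      (PySem.Dict.empty : PySem.Dict String (List (List Int)))
      = (pvStream fl).foldl
          (fun d kv => d.modify kv.1 [] (fun v => v ++ [kv.2])) PySem.Dict.empty :=
    (List.foldl_flatMap).symm
  set dA := (pvStream fl).foldl
      (fun d kv => d.modify kv.1 [] (fun v => v ++ [kv.2]))
      (PySem.Dict.empty : PySem.Dict String (List (List Int))) with hdA
  have hkeysA : dA.keys = PySem.Set.ofList ((pvStream fl).map (fun p => p.1)) := by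
    rw [hdA, PySem.Dict.keys_foldl_modify_key]
    simp [PySem.Dict.empty, PySem.Dict.keys, PySem.Set.update_nil_left]
  have hnodupA : dA.keys.Nodup := by
    rw [hkeysA]; exact PySem.Set.nodup_ofList _
  have hget : ∀ k, dA.getD k []
      = ((pvStream fl).filter (fun p => p.1 == k)).map (fun p => p.2) := by
    intro k
    rw [hdA, PySem.Dict.getD_foldl_modify_append]
    simp
  have hitems : dA.items = dA.keys.map (fun k => (k, dA.getD k [])) :=
    PySem.Dict.items_eq_map_keys dA hnodupA []
  -- A's second pass: fresh inserts into an empty dict, in order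
  have hfreshA := PySem.Dict.items_foldl_insert_fresh dA.items
      (fun kv => kv.1) (fun kv => kv.2.flatten)
      (PySem.Dict.empty : PySem.Dict String (List Int))
      (fun a _ => PySem.Dict.contains_empty a.1) hnodupA
  -- B's keys and its comprehension over fresh distinct keys
  rw [pvKeysB]
  have hfreshB := PySem.Dict.items_foldl_insert_fresh
      (PySem.Set.ofList ((pvStream fl).map (fun p => p.1)))
      (fun key => key)
      (fun key => fl.flatMap (fun person =>
        if (PySem.Dict.ofList person).contains key
        then ((PySem.Dict.ofList person).get? key).getD [] else []))
      (PySem.Dict.empty : PySem.Dict String (List Int))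
      (fun a _ => PySem.Dict.contains_empty a)
      (by simp)
  rw [hA, hfreshA, hfreshB, hitems]
  simp only [PySem.Dict.empty, List.nil_append, List.map_map]
  rw [← hkeysA]
  refine List.map_congr_left (fun k _ => ?_)
  simp only [Function.comp]
  refine congrArg (fun v => (k, v)) ?_
  rw [hget]
  have : ∀ person, (if (PySem.Dict.ofList person).contains k
      then ((PySem.Dict.ofList person).get? k).getD [] else [])
      = (((PySem.Dict.ofList person).items.filter (fun q => q.1 == k)).map (fun p => p.2)).flatten :=
    fun person => (pvPerPerson k person).symm
  simp only [this, pvStream, List.filter_flatMap, List.map_flatMap, pvFlattenFlatMap]
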